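-- pv_equiv track=rewrite | github.com/Baglecake/emile-GCE | social_rl/context_injector.py | _detect_interaction_patterns
-- ===== SOURCE A (Python) =====
-- from typing import Dict, Any, List, Optional, Callable
--
-- def _detect_interaction_patterns(recent: List[Dict[str, str]]) -> Dict[str, Any]:
--     """Detect patterns in recent interactions."""
--     patterns = {
--         "conflict": False,
--         "compliance": False,
--         "question_asked": False,
--         "directive_given": False
--     }
--
--     for msg in recent:
--         content = msg.get("content", "").lower()
--         if "?" in content:
--             patterns["question_asked"] = True
--         if any(word in content for word in ["must", "will", "should", "need to"]):
--             patterns["directive_given"] = True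
--         if any(word in content for word in ["yes", "understand", "okay", "i'll"]):
--             patterns["compliance"] = True
--         if any(word in content for word in ["but", "however", "disagree", "refuse"]):
--             patterns["conflict"] = True
--
--     return patterns
-- ===== SOURCE B (Python) =====
-- from typing import Dict, Any, List
--
-- def _detect_interaction_patterns(recent: List[Dict[str, str]]) -> Dict[str, Any]:
--     """Detect patterns in recent interactions."""
--     def seen(words):
--         return any(any(w in m.get("content", "").lower() for w in words) for m in recent)
--     return {
--         "conflict": seen(["but", "however", "disagree", "refuse"]),
--         "compliance": seen(["yes", "understand", "okay", "i'll"]),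
--         "question_asked": any("?" in m.get("content", "").lower() for m in recent),
--         "directive_given": seen(["must", "will", "should", "need to"]),
--     }
-- ===== Notes on version B (the rewrite author's own statement) =====
-- stated objective: simpler
-- what changed: A makes one pass over the messages mutating a four-flag dict with four conditional updates per message; B computes each flag independently as its own any()-scan over the messages and assembles the dict once from the results.
import Mathlib
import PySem

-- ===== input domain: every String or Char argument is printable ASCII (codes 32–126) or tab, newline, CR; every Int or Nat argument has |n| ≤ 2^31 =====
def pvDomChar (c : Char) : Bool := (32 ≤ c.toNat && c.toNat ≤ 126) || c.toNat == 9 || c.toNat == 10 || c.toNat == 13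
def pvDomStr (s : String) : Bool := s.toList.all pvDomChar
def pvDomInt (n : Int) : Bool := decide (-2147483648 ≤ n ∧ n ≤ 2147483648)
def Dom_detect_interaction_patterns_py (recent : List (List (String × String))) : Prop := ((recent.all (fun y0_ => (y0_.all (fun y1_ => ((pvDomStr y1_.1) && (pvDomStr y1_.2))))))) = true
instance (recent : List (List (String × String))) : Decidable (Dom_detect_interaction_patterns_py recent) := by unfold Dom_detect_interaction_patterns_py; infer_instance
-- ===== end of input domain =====

-- B replaces A's single pass that mutates a four-flag dict with four independent any()-scans, one per flag (objective: simpler).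


-- ===== PORT A =====
-- loop body of A: content = msg.get("content","").lower(); four conditional dict updates
def pvStepA (patterns : PySem.Dict String Bool) (msg : List (String × String)) : PySem.Dict String Bool :=
  let content := PySem.Str.lower ((PySem.Dict.mk msg).getD "content" "")
  let patterns := if PySem.Str.isIn "?" content then patterns.insert "question_asked" true else patterns
  let patterns := if (["must", "will", "should", "need to"].any (fun word => PySem.Str.isIn word content)) then patterns.insert "directive_given" true else patterns
  let patterns := if (["yes", "understand", "okay", "i'll"].any (fun word => PySem.Str.isIn word content)) then patterns.insert "compliance" true else patterns
  let patterns := if (["but", "however", "disagree", "refuse"].any (fun word => PySem.Str.isIn word content)) then patterns.insert "conflict" true else patterns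
  patterns

def detect_interaction_patterns_py (recent : List (List (String × String))) : List (String × Bool) :=
  (recent.foldl pvStepA
    (PySem.Dict.mk [("conflict", false), ("compliance", false), ("question_asked", false), ("directive_given", false)])).items

-- ===== PORT B =====
-- content of a message, lower-cased
def pvContentB (m : List (String × String)) : String :=
  PySem.Str.lower ((PySem.Dict.mk m).getD "content" "")

-- seen(words): some message's content contains one of the words
def pvSeenB (recent : List (List (String × String))) (words : List String) : Bool :=
  recent.any (fun m => words.any (fun w => PySem.Str.isIn w (pvContentB m)))

def detect_interaction_patterns_py_alt (recent : List (List (String × String))) : List (String × Bool) :=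
  [("conflict", pvSeenB recent ["but", "however", "disagree", "refuse"]),
   ("compliance", pvSeenB recent ["yes", "understand", "okay", "i'll"]),
   ("question_asked", recent.any (fun m => PySem.Str.isIn "?" (pvContentB m))),
   ("directive_given", pvSeenB recent ["must", "will", "should", "need to"])]

-- ===== PRECONDITION & SPEC =====
def Spec_detect_interaction_patterns_py (recent : List (List (String × String))) (out : List (String × Bool)) : Prop := out = detect_interaction_patterns_py_alt recent
instance (recent : List (List (String × String))) (out : List (String × Bool)) : Decidable (Spec_detect_interaction_patterns_py recent out) := by unfold Spec_detect_interaction_patterns_py; infer_instance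

-- ===== CLAIM (what is proved, stated in full; the proofs are below) =====
def Claim_equal_detect_interaction_patterns_py : Prop := ∀ (recent : List (List (String × String))), Dom_detect_interaction_patterns_py recent → Spec_detect_interaction_patterns_py recent (detect_interaction_patterns_py recent)

-- ===== LEMMAS AND PROOFS =====

-- one step of A's loop keeps the four-key shape and ORs each flag with its per-message predicate
theorem pvStepA_shape (a b q g : Bool) (m : List (String × String)) :
    pvStepA (PySem.Dict.mk [("conflict", a), ("compliance", b), ("question_asked", q), ("directive_given", g)]) m
      = PySem.Dict.mk
          [("conflict", a || (["but", "however", "disagree", "refuse"].any (fun w => PySem.Str.isIn w (pvContentB m)))),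
           ("compliance", b || (["yes", "understand", "okay", "i'll"].any (fun w => PySem.Str.isIn w (pvContentB m)))),
           ("question_asked", q || PySem.Str.isIn "?" (pvContentB m)),
           ("directive_given", g || (["must", "will", "should", "need to"].any (fun w => PySem.Str.isIn w (pvContentB m))))] := by
  unfold pvStepA pvContentB
  dsimp only
  split_ifs <;>
    simp_all [PySem.Dict.insert, PySem.Dict.contains]

-- A's whole loop, from an arbitrary four-flag state
theorem pvLoopA (recent : List (List (String × String))) (a b q g : Bool) :
    (recent.foldl pvStepA
        (PySem.Dict.mk [("conflict", a), ("compliance", b), ("question_asked", q), ("directive_given", g)])).items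
      = [("conflict", a || pvSeenB recent ["but", "however", "disagree", "refuse"]),
         ("compliance", b || pvSeenB recent ["yes", "understand", "okay", "i'll"]),
         ("question_asked", q || recent.any (fun m => PySem.Str.isIn "?" (pvContentB m))),
         ("directive_given", g || pvSeenB recent ["must", "will", "should", "need to"])] := by
  induction recent generalizing a b q g with
  | nil => simp [pvSeenB]
  | cons m rest ih =>
      rw [List.foldl_cons, pvStepA_shape, ih]
      simp [pvSeenB, Bool.or_assoc]

-- ===== VERDICT (by name: the statement is the Claim_ definition above) =====
theorem detect_interaction_patterns_py_spec : Claim_equal_detect_interaction_patterns_py := by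
  intro recent _
  show detect_interaction_patterns_py recent = detect_interaction_patterns_py_alt recent
  rw [detect_interaction_patterns_py, pvLoopA]
  simp [detect_interaction_patterns_py_alt]
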